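-- pv_equiv track=rewrite | github.com/SrNightmare09/wave-function-collapse | psuedo/main.py | left_collapse
-- ===== SOURCE A (Python) =====
-- def left_collapse(ch):
--     possible_connections = {
--         'd': ['l', 'd', 'u'],
--         'u': ['l', 'd', 'u'],
--         'l': ['b', 'r'],
--         'r': ['l', 'd', 'u'],
--         'b': ['b', 'r']
--     }
--
--     options = []
--
--     for tile in possible_connections:
--         if (tile == ch):
--             options = possible_connections[tile]
--             break
--
--     return options
-- ===== SOURCE B (Python) =====
-- def left_collapse(ch):
--     if len(ch) != 1:
--         return []
--     i = "durlb".find(ch)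
--     if i < 0:
--         return []
--     return ["b", "r"] if i // 3 == 1 else ["l", "d", "u"]
-- ===== Notes on version B (the rewrite author's own statement) =====
-- stated objective: alternative
-- what changed: Replaced the dict and key-scanning loop with a positional search of the character in a five-character code string plus integer division of the found index by 3 to select between the two constant answer lists.
import Mathlib
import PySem

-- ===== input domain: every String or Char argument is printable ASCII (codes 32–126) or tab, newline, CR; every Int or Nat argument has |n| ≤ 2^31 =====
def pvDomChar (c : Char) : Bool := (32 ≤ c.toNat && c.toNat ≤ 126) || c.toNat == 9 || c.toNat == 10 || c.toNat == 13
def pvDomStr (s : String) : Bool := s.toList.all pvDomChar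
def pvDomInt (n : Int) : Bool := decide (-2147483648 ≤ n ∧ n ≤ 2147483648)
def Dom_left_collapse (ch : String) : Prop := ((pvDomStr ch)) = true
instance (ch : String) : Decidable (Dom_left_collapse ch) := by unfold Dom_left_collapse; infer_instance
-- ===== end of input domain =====

-- B replaces A's dict and key-scanning loop with a positional search in the code
-- string "durlb" and integer division to pick the answer class (objective: alternative).

-- ===== PORT A =====
-- the dict literal, as an insertion-ordered association list
def pcA : List (String × List String) :=
  [("d", ["l", "d", "u"]),
   ("u", ["l", "d", "u"]),
   ("l", ["b", "r"]),
   ("r", ["l", "d", "u"]),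
   ("b", ["b", "r"])]

-- A's 'for tile in possible_connections: if tile == ch: options = ...; break'
def loopA (ch : String) (options : List String) : List (String × List String) → List String
  | [] => options
  | (tile, v) :: rest => if tile = ch then v else loopA ch options rest

def left_collapse (ch : String) : List String := loopA ch [] pcA

-- ===== PORT B =====
def left_collapse_alt (ch : String) : List String :=
  if PySem.Str.len ch ≠ 1 then []
  else
    let i := PySem.Str.find "durlb" ch
    if i < 0 then []
    else if PySem.Int.floordiv i 3 = 1 then ["b", "r"] else ["l", "d", "u"]

-- ===== PRECONDITION & SPEC =====
def Spec_left_collapse (ch : String) (out : List String) : Prop := out = left_collapse_alt ch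
instance (ch : String) (out : List String) : Decidable (Spec_left_collapse ch out) := by unfold Spec_left_collapse; infer_instance

-- ===== CLAIM =====
def Claim_equal_left_collapse : Prop := ∀ (ch : String), Dom_left_collapse ch → Spec_left_collapse ch (left_collapse ch)

-- ===== LEMMAS AND PROOFS =====

-- a string whose character list is a given literal IS that literal string
theorem str_of_toList (s : String) (l : List Char) (h : s.toList = l) : s = String.ofList l := by
  have h2 := String.ofList_toList (s := s)
  rw [h] at h2; exact h2.symm

-- on a miss (ch none of the five keys) B's find returns -1, so B yields []
theorem alt_miss (ch : String) (hd : ch ≠ "d") (hu : ch ≠ "u") (hl : ch ≠ "l")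
    (hr : ch ≠ "r") (hb : ch ≠ "b") : left_collapse_alt ch = [] := by
  unfold left_collapse_alt
  by_cases hlen : PySem.Str.len ch = 1
  · have hlen' : ch.toList.length = 1 := by
      have := PySem.Str.len_eq ch
      have h3 : ch.toList.length = ch.length := by simp
      omega
    obtain ⟨c, hc⟩ : ∃ c, ch.toList = [c] := by
      cases h : ch.toList with
      | nil => simp [h] at hlen'
      | cons a t => cases t with
        | nil => exact ⟨a, rfl⟩
        | cons b t' => simp [h] at hlen'
    have hfind : PySem.Str.find "durlb" ch = -1 := by
      rw [PySem.Str.find_eq_neg_one_iff]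
      intro hin
      rw [hc] at hin
      have hmem := (List.singleton_infix_iff c _).mp hin
      fin_cases hmem <;>
        [exact hd (str_of_toList ch ['d'] hc);
         exact hu (str_of_toList ch ['u'] hc);
         exact hr (str_of_toList ch ['r'] hc);
         exact hl (str_of_toList ch ['l'] hc);
         exact hb (str_of_toList ch ['b'] hc)]
    have hfind' := hfind
    simp at hfind'
    simp [hfind']
  · have hlen2 : ¬ ch.length = 1 := by
      have := PySem.Str.len_eq ch
      have h3 : ch.toList.length = ch.length := by simp
      omega
    simp [hlen2]

-- ===== VERDICT =====
theorem left_collapse_spec : Claim_equal_left_collapse := by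
  intro ch _
  unfold Spec_left_collapse
  by_cases hd : ch = "d"
  · subst hd; decide
  by_cases hu : ch = "u"
  · subst hu; decide
  by_cases hl : ch = "l"
  · subst hl; decide
  by_cases hr : ch = "r"
  · subst hr; decide
  by_cases hb : ch = "b"
  · subst hb; decide
  rw [alt_miss ch hd hu hl hr hb]
  unfold left_collapse pcA loopA
  simp [loopA, eq_comm, hd, hu, hl, hr, hb]
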